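-- pv_equiv track=rewrite | github.com/tianyi-gu/news-api | app.py | parse_article_content
-- ===== SOURCE A (Python) =====
-- def parse_article_content(content):
--     """Parse article content with metadata"""
--     lines = content.split('\n')
--     metadata = {}
--     content_lines = []
--     parsing_content = False
--
--     for line in lines:
--         if line.strip() == '---':
--             parsing_content = True
--             continue
--         if not parsing_content:
--             if ':' in line:
--                 key, value = line.split(':', 1)
--                 metadata[key.strip().lower()] = value.strip()
--         else:
--             content_lines.append(line)
--
--     return metadata, '\n'.join(content_lines)
-- ===== SOURCE B (Python) =====
-- def parse_article_content(content):
--     """Parse article content with metadata"""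
--     lines = content.split('\n')
--     sep = next((i for i, l in enumerate(lines) if l.strip() == '---'), None)
--     header = lines if sep is None else lines[:sep]
--     body = [] if sep is None else lines[sep + 1:]
--     metadata = {k.strip().lower(): v.strip()
--                 for k, v in (l.split(':', 1) for l in header if ':' in l)}
--     return metadata, '\n'.join(l for l in body if l.strip() != '---')
-- ===== Notes on version B (the rewrite author's own statement) =====
-- stated objective: simpler
-- what changed: A's single loop threading a parsing_content flag through every line is replaced by locating the first '---' separator line, then two independent passes: a dict comprehension over the header lines and a filtered join of the body lines.
import Mathlib
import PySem

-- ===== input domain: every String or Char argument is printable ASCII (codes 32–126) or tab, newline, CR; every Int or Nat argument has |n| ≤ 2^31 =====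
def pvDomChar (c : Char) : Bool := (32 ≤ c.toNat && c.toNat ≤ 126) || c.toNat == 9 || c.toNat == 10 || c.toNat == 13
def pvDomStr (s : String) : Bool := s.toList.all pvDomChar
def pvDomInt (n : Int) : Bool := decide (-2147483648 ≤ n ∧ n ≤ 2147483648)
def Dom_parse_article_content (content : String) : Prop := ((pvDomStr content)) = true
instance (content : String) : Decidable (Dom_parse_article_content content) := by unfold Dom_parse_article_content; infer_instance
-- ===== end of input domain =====

-- B replaces A's single stateful loop (a parsing_content flag threaded through every line) by a
-- split at the first '---' line followed by two independent passes (header → dict, body → join);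
-- objective: simpler decomposition, same exact result.

-- shared helpers: both Pythons contain literally these sub-expressions
-- content.split('\n')  (sep ≠ "", so split? never returns none; getD only discharges the option)
def pacLines (content : String) : List String :=
  (PySem.Str.split? content "\n").getD []

-- line.split(':', 1) then (key.strip().lower(), value.strip()); none when the split does not
-- yield two pieces (unreachable when ':' is in the line)
def pacKV (l : String) : Option (String × String) :=
  match PySem.Str.splitMax? l ":" 1 with
  | some (k :: v :: _) => some (PySem.Str.lower (PySem.Str.strip k), PySem.Str.strip v)
  | _ => none

-- A's header-line handling: if ':' in line, insert the stripped/lowered key and stripped value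
def pacIns (md : PySem.Dict String String) (l : String) : PySem.Dict String String :=
  if PySem.Str.isIn ":" l then
    match pacKV l with
    | some (k, v) => md.insert k v
    | none => md
  else md

-- ===== PORT A =====
-- loop body of A's for-loop; state = (metadata, content_lines, parsing_content)
def pacStep (st : PySem.Dict String String × List String × Bool) (line : String) :
    PySem.Dict String String × List String × Bool :=
  if PySem.Str.strip line == "---" then (st.1, st.2.1, true)
  else if st.2.2 = false then (pacIns st.1 line, st.2.1, st.2.2)
  else (st.1, st.2.1 ++ [line], st.2.2)

def parse_article_content (content : String) : (List (String × String)) × String :=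
  let lines := pacLines content
  let st := lines.foldl pacStep (PySem.Dict.empty, [], false)
  (st.1.items, PySem.Str.join "\n" st.2.1)

-- ===== PORT B =====
def parse_article_content_alt (content : String) : (List (String × String)) × String :=
  let lines := pacLines content
  let sep := lines.findIdx? (fun l => PySem.Str.strip l == "---")
  let header := match sep with | none => lines | some i => lines.take i
  let body := match sep with | none => ([] : List String) | some i => lines.drop (i + 1)
  let metadata := PySem.Dict.ofList
    ((header.filter (fun l => PySem.Str.isIn ":" l)).filterMap pacKV)
  (metadata.items,
   PySem.Str.join "\n" (body.filter (fun l => !(PySem.Str.strip l == "---"))))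

-- ===== PRECONDITION & SPEC =====
def Spec_parse_article_content (content : String) (out : (List (String × String)) × String) : Prop := out = parse_article_content_alt content
instance (content : String) (out : (List (String × String)) × String) : Decidable (Spec_parse_article_content content out) := by unfold Spec_parse_article_content; infer_instance

-- ===== CLAIM (what is proved, stated in full; the proofs are below) =====
def Claim_equal_parse_article_content : Prop := ∀ (content : String), Dom_parse_article_content content → Spec_parse_article_content content (parse_article_content content)

-- ===== LEMMAS AND PROOFS =====

-- phase with parsing_content = true: only collects non-'---' lines
lemma pacLoop_true (lines : List String) (md : PySem.Dict String String) (cls : List String) :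
    lines.foldl pacStep (md, cls, true) =
      (md, cls ++ lines.filter (fun l => !(PySem.Str.strip l == "---")), true) := by
  induction lines generalizing cls with
  | nil => simp
  | cons l rest ih =>
    by_cases h : PySem.Str.strip l == "---" <;>
      simp [pacStep, h, ih, List.filter_cons]

-- phase with parsing_content = false, characterised by the first '---' line
lemma pacLoop_false (lines : List String) (md : PySem.Dict String String) (cls : List String) :
    lines.foldl pacStep (md, cls, false) =
      match lines.findIdx? (fun l => PySem.Str.strip l == "---") with
      | none => ((lines.filter (fun l => PySem.Str.isIn ":" l)).foldl pacIns md, cls, false)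
      | some i => (((lines.take i).filter (fun l => PySem.Str.isIn ":" l)).foldl pacIns md,
                   cls ++ ((lines.drop (i + 1)).filter (fun l => !(PySem.Str.strip l == "---"))), true) := by
  induction lines generalizing md with
  | nil => simp
  | cons l rest ih =>
    by_cases h : PySem.Str.strip l == "---"
    · simp [List.findIdx?_cons, h, pacStep, pacLoop_true]
    · have hstep : pacStep (md, cls, false) l = (pacIns md l, cls, false) := by
        simp [pacStep, h]
      rw [List.foldl_cons, hstep, ih, List.findIdx?_cons]
      simp only [h, if_false]
      by_cases hg : PySem.Chars.isIn [':'] l.toList = true <;>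
        cases hfi : rest.findIdx? (fun l => PySem.Str.strip l == "---") <;>
          simp [hfi, List.filter_cons, hg, pacIns]

-- a fold of pacIns is a fold of plain inserts over the filterMapped key/value pairs
lemma pacIns_foldl (hs : List String) (md : PySem.Dict String String) :
    (hs.filter (fun l => PySem.Str.isIn ":" l)).foldl pacIns md =
      ((hs.filter (fun l => PySem.Str.isIn ":" l)).filterMap pacKV).foldl
        (fun d p => d.insert p.1 p.2) md := by
  induction hs generalizing md with
  | nil => rfl
  | cons l rest ih =>
    by_cases hg : PySem.Chars.isIn [':'] l.toList = true
    · cases hkv : pacKV l <;>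
        simp [List.filter_cons, hg, List.filterMap_cons, hkv, pacIns] <;>
        simpa using ih _
    · simp [List.filter_cons, hg]
      simpa using ih md

-- dict(pairs) is the fold of inserts into the empty dict
lemma dict_ofList_eq_foldl (pairs : List (String × String)) :
    PySem.Dict.ofList pairs = pairs.foldl (fun d p => d.insert p.1 p.2) PySem.Dict.empty := rfl

-- ===== VERDICT (by name: the statement is the Claim_ definition above) =====
theorem parse_article_content_spec : Claim_equal_parse_article_content := by
  intro content _
  show parse_article_content content = parse_article_content_alt content
  simp only [parse_article_content, parse_article_content_alt]
  rw [pacLoop_false]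
  cases hfi : (pacLines content).findIdx? (fun l => PySem.Str.strip l == "---") with
  | none =>
    simp only [List.filter_nil]
    rw [pacIns_foldl, dict_ofList_eq_foldl]
  | some i =>
    simp only [List.nil_append]
    rw [pacIns_foldl, dict_ofList_eq_foldl]
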